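-- pv_equiv track=rewrite | github.com/toastedyeti/AdventOfCode2018 | D8/D8.py | part2
-- ===== SOURCE A (Python) =====
-- def part2(data):
--     c, m = data[:2]
--     data = data[2:]
--     total = 0
--     scores = []
--
--     for i in range(c):
--         t, data,v = part2(data)
--         total += t
--         scores.append(v)
--
--     total += sum(data[:m])
--
--     if c == 0:
--         return (total, data[m:], sum(data[:m]))
--     else:
--         v = sum(scores[k-1] for k in data[:m] if k > 0 and k<= len(scores))
--         return (total, data[m:], v)
-- ===== SOURCE B (Python) =====
-- def part2(data):
--     c, m = data[0], data[1]
--     rest = data[2:]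
--     stack = [(c, m, 0, [])]
--     while True:
--         c, m, total, scores = stack[-1]
--         if len(scores) < c:
--             stack.append((rest[0], rest[1], 0, []))
--             rest = rest[2:]
--         else:
--             meta = rest[:m]
--             rest = rest[m:]
--             total += sum(meta)
--             if c == 0:
--                 v = sum(meta)
--             else:
--                 v = sum(scores[k - 1] for k in meta if k > 0 and k <= len(scores))
--             stack.pop()
--             if not stack:
--                 return (total, rest, v)
--             pc, pm, ptotal, pscores = stack[-1]
--             stack[-1] = (pc, pm, ptotal + total, pscores + [v])
-- ===== Notes on version B (the rewrite author's own statement) =====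
-- stated objective: alternative
-- what changed: Replaced A's recursive descent (and its per-node children loop) by a single iterative stack machine: one cursor list plus an explicit stack of in-progress frames (child count, metadata count, running total, child scores), folding each finished node into its parent.
import Mathlib
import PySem

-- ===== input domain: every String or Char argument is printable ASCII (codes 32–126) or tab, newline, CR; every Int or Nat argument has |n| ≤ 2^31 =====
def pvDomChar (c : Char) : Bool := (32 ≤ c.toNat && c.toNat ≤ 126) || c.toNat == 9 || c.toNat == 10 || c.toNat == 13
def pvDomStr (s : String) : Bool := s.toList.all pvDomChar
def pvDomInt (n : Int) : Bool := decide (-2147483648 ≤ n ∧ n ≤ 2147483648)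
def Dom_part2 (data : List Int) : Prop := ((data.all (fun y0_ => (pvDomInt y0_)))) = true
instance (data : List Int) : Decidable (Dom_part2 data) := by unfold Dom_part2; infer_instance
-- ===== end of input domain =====

-- B replaces A's recursion by an explicit stack machine over a single remaining-input list (alternative decomposition; return value equivalence only).

-- shared helper: the identical Python line `sum(scores[k-1] for k in md if k > 0 and k <= len(scores))` appearing in both sources
def pvScoreSum (scores md : List Int) : Int :=
  md.foldl (fun acc k =>
    if 0 < k ∧ k ≤ (scores.length : Int) then acc + (PySem.List.pyGet? scores (k - 1)).getD 0 else acc) 0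

-- ===== PORT A =====
-- A's recursion; the subtype bound on the returned rest is only for termination.
-- `none` is exactly where Python raises (header shorter than 2 values); excluded by Pre_.
mutual
def part2go : (data : List Int) → Option {r : Int × List Int × Int // r.2.1.length + 2 ≤ data.length}
  | c :: m :: t =>
    match part2kids c m c.toNat 0 [] t with
    | none => none
    | some ⟨r, h⟩ => some ⟨r, by simpa using Nat.add_le_add_right h 2⟩
  | _ => none   -- `c, m = data[:2]` raises ValueError
termination_by data => (data.length, 0)
decreasing_by simp; omega

-- A's `for i in range(c)` loop with its accumulators `total` and `scores`, then the post-loop mddata lines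
def part2kids (c m : Int) : (n : Nat) → (total : Int) → (scores : List Int) → (data : List Int) →
    Option {r : Int × List Int × Int // r.2.1.length ≤ data.length}
  | 0, total, scores, data =>
    let md := PySem.List.slice data none (some m)        -- data[:m]
    let rest := PySem.List.slice data (some m) none        -- data[m:]
    if c = 0 then
      some ⟨(total + md.sum, rest, md.sum), by
        show (PySem.List.slice data (some m) none).length ≤ data.length
        rw [PySem.List.slice_some_none]; simp⟩
    else
      some ⟨(total + md.sum, rest, pvScoreSum scores md), by
        show (PySem.List.slice data (some m) none).length ≤ data.length
        rw [PySem.List.slice_some_none]; simp⟩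
  | n + 1, total, scores, data =>
    match part2go data with
    | none => none
    | some ⟨(t1, d1, v1), h⟩ =>
      match part2kids c m n (total + t1) (scores ++ [v1]) d1 with
      | none => none
      | some ⟨r, h'⟩ => some ⟨r, by simp at h; omega⟩
termination_by n _total _scores data => (data.length, n + 1)
decreasing_by
  · simp at *; omega
  · simp at *; omega
end

-- equality of the two ports in fact also holds at the defaults, but the claim is stated on Pre_ (where Python returns)
def part2 (data : List Int) : Int × List Int × Int :=
  match part2go data with
  | some r => r.val
  | none => (0, [], 0)   -- Python raises here; Pre_ excludes these inputs

-- ===== PORT B =====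
-- B's while-loop: stack frames (c, m, total, scores); defaults replace Python's IndexError (excluded by Pre_)
def part2loop : (rest : List Int) → (stack : List (Int × Int × Int × List Int)) → Int × List Int × Int
  | rest, (c, m, total, scores) :: stk =>
    if (scores.length : Int) < c then
      match rest with
      | ch :: mh :: t => part2loop t ((ch, mh, 0, ([] : List Int)) :: (c, m, total, scores) :: stk)
      | _ => (0, [], 0)   -- `rest[0]`/`rest[1]` raises IndexError; excluded by Pre_
    else
      let md := PySem.List.slice rest none (some m)      -- rest[:m]
      let rest' := PySem.List.slice rest (some m) none     -- rest[m:]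
      let total' := total + md.sum
      let v := if c = 0 then md.sum else pvScoreSum scores md
      match stk with
      | [] => (total', rest', v)
      | (pc, pm, pt, ps) :: s => part2loop rest' ((pc, pm, pt + total', ps ++ [v]) :: s)
  | _, [] => (0, [], 0)   -- unreachable: Python's stack is nonempty while looping
termination_by rest stack => rest.length + stack.length
decreasing_by
  · simp; omega
  · have := PySem.List.clampIdx_le rest.length m
    simp [PySem.List.slice_some_none]; omega

def part2_alt (data : List Int) : Int × List Int × Int :=
  match data with
  | c :: m :: t => part2loop t [(c, m, 0, [])]
  | _ => (0, [], 0)   -- `data[1]` raises IndexError; excluded by Pre_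

-- ===== PRECONDITION & SPEC =====
-- Pre_ = exactly the inputs on which A returns (every recursive header read finds >= 2 values).
-- Parse success of this recursive length-prefixed grammar has no loop-free closed form, so it is stated
-- as a minimal shape recognizer (headers and spans only; it computes no totals/scores/values).
-- pvTreePrefix f n data: do n consecutive node encodings start at data (returning the remainder)?
-- The first argument only makes the recursion structural: any value ≥ data.length + 1 gives the same answer.
def pvTreePrefix : Nat → Nat → List Int → Option (List Int)
  | 0, _, _ => none            -- never reached from Pre_part2 (each recursion drops ≥ 2 list elements)
  | _ + 1, 0, data => some data
  | f + 1, n + 1, data =>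
    match data with
    | c :: m :: t =>
      match pvTreePrefix f c.toNat t with
      | some t' => pvTreePrefix f n (PySem.List.slice t' (some m) none)
      | none => none
    | _ => none

def Pre_part2 (data : List Int) : Prop := (pvTreePrefix (data.length + 1) 1 data).isSome = true
instance (data : List Int) : Decidable (Pre_part2 data) := by unfold Pre_part2; infer_instance

def pvWitness_part2 : List Int := [2, 3, 0, 3, 10, 11, 12, 1, 1, 0, 1, 99, 2, 1, 1, 2]

def Spec_part2 (data : List Int) (out : Int × List Int × Int) : Prop := out = part2_alt data
instance (data : List Int) (out : Int × List Int × Int) : Decidable (Spec_part2 data out) := by unfold Spec_part2; infer_instance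

-- ===== CLAIM (what is proved, stated in full; the proofs are below) =====
def Claim_equal_part2 : Prop := ∀ (data : List Int), Dom_part2 data → Pre_part2 data → Spec_part2 data (part2 data)

-- ===== LEMMAS AND PROOFS =====

-- what B's machine does after finishing a node with A-result r: return it, or fold it into the parent frame
def pvAfter (r : Int × List Int × Int) : List (Int × Int × Int × List Int) → Int × List Int × Int
  | [] => r
  | (pc, pm, pt, ps) :: s => part2loop r.2.1 ((pc, pm, pt + r.1, ps ++ [r.2.2]) :: s)

-- finished frame: the machine's pop step computes exactly A's post-loop lines
lemma pvPop (c m total : Int) (scores data : List Int) (stk : List (Int × Int × Int × List Int))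
    (h : c.toNat = scores.length) :
    part2loop data ((c, m, total, scores) :: stk) =
      match part2kids c m 0 total scores data with
      | some r => pvAfter r.val stk
      | none => (0, [], 0) := by
  have hnlt : ¬ ((scores.length : Int) < c) := by omega
  rw [part2loop.eq_def, part2kids.eq_def]
  simp only [hnlt, if_false]
  by_cases hc : c = 0 <;> cases stk <;> simp [pvAfter, hc]

-- main simulation invariant: a frame with n children still to parse behaves like A's child loop
lemma pvMain : ∀ (L : Nat) (data : List Int), data.length ≤ L →
    ∀ (c m : Int) (n : Nat) (total : Int) (scores : List Int) (stk : List (Int × Int × Int × List Int)),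
    n + scores.length = c.toNat →
    part2loop data ((c, m, total, scores) :: stk) =
      match part2kids c m n total scores data with
      | some r => pvAfter r.val stk
      | none => (0, [], 0) := by
  intro L
  induction L with
  | zero =>
    intro data hL c m n total scores stk hinv
    cases n with
    | zero => exact pvPop c m total scores data stk (by omega)
    | succ n =>
      have hlt : (scores.length : Int) < c := by omega
      have hdata : data = [] := List.eq_nil_of_length_eq_zero (by omega)
      subst hdata
      rw [part2loop.eq_def, part2kids.eq_def]
      simp [hlt, part2go]
  | succ L ih =>
    intro data hL c m n total scores stk hinv
    cases n with
    | zero => exact pvPop c m total scores data stk (by omega)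
    | succ n =>
      have hlt : (scores.length : Int) < c := by omega
      match data with
      | [] => rw [part2loop.eq_def, part2kids.eq_def]; simp [hlt, part2go]
      | [x] => rw [part2loop.eq_def, part2kids.eq_def]; simp [hlt, part2go]
      | ch :: mh :: t =>
        rw [part2loop.eq_def]
        simp only [hlt, if_true]
        have ht : t.length ≤ L := by simp at hL; omega
        have step := ih t ht ch mh ch.toNat 0 [] ((c, m, total, scores) :: stk) (by simp)
        rw [step]
        conv_rhs => rw [part2kids.eq_def]
        simp only [part2go]
        cases hkg : part2kids ch mh ch.toNat 0 [] t with
        | none => simp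
        | some r1 =>
          obtain ⟨⟨t1, d1, v1⟩, hb⟩ := r1
          simp only [pvAfter]
          have hd1 : d1.length ≤ L := by simp at hL hb; omega
          rw [ih d1 hd1 c m n (total + t1) (scores ++ [v1]) stk (by simp; omega)]
          cases part2kids c m n (total + t1) (scores ++ [v1]) d1 <;>
            rcases stk with _ | ⟨⟨pc, pm, pt, ps⟩, s⟩ <;> simp [pvAfter]

lemma pvTotalEq (data : List Int) : part2 data = part2_alt data := by
  match data with
  | [] => simp [part2, part2_alt, part2go.eq_def]
  | [x] => simp [part2, part2_alt, part2go.eq_def]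
  | c :: m :: t =>
    simp only [part2, part2_alt]
    rw [pvMain t.length t (le_refl _) c m c.toNat 0 [] [] (by simp), part2go.eq_def]
    rcases hk : part2kids c m c.toNat 0 [] t with _ | ⟨r, hr⟩ <;> simp [hk, pvAfter]

-- ===== VERDICT (by name: the statement is the Claim_ definition above) =====
theorem part2_spec : Claim_equal_part2 := by
  intro data _ _
  exact pvTotalEq data
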